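-- pv_equiv track=rewrite | github.com/tylerb-jpg/videoask-reviewer | scripts/catch-up-batch.py | extract_city
-- ===== SOURCE A (Python) =====
-- KNOWN_CITIES = {
--     'atlanta': 'Atlanta, GA', 'jonesboro': 'Jonesboro, GA', 'lithonia': 'Lithonia, GA',
--     'conyers': 'Conyers, GA', 'riverdale': 'Riverdale, GA', 'decatur': 'Decatur, GA',
--     'marietta': 'Marietta, GA', 'lawrenceville': 'Lawrenceville, GA', 'college park': 'College Park, GA',
--     'stone mountain': 'Stone Mountain, GA', 'stonecrest': 'Stonecrest, GA',
--     'mcdonough': 'McDonough, GA', 'covington': 'Covington, GA', 'augusta': 'Augusta, GA',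
--     'savannah': 'Savannah, GA', 'macon': 'Macon, GA', 'powder springs': 'Powder Springs, GA',
--     'kennesaw': 'Kennesaw, GA', 'douglasville': 'Douglasville, GA',
--     'fayetteville': 'Fayetteville, GA', 'stockbridge': 'Stockbridge, GA',
--     'south fulton': 'South Fulton, GA', 'forest park': 'Forest Park, GA',
--     'provo': 'Provo, UT', 'salt lake': 'Salt Lake City, UT', 'orem': 'Orem, UT',
--     'lehi': 'Lehi, UT', 'eagle mountain': 'Eagle Mountain, UT', 'draper': 'Draper, UT',
--     'sandy': 'Sandy, UT', 'ogden': 'Ogden, UT', 'layton': 'Layton, UT',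
--     'american fork': 'American Fork, UT', 'springville': 'Springville, UT',
--     'herriman': 'Herriman, UT', 'saratoga springs': 'Saratoga Springs, UT',
--     'phoenix': 'Phoenix, AZ', 'tucson': 'Tucson, AZ', 'mesa': 'Mesa, AZ',
--     'tempe': 'Tempe, AZ', 'chandler': 'Chandler, AZ', 'gilbert': 'Gilbert, AZ',
--     'scottsdale': 'Scottsdale, AZ', 'glendale': 'Glendale, AZ', 'peoria': 'Peoria, AZ',
--     'surprise': 'Surprise, AZ', 'avondale': 'Avondale, AZ', 'goodyear': 'Goodyear, AZ',
--     'buckeye': 'Buckeye, AZ', 'queen creek': 'Queen Creek, AZ',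
-- }
--
-- def extract_city(q4, market):
--     if not q4: return market.title()
--     q4_lower = q4.lower()
--     best_match, best_pos = None, len(q4_lower)
--     for city_key, city_display in KNOWN_CITIES.items():
--         pos = q4_lower.find(city_key)
--         if pos >= 0 and pos < best_pos:
--             best_match, best_pos = city_display, pos
--     if best_match: return best_match
--     q4_clean = q4.strip()
--     for prefix in ['I am currently located in ','I currently reside here in ',
--                    'I live in the ','I live in ',"I'm in ",'I am in ','I stay in ']:
--         if q4_clean.lower().startswith(prefix.lower()):
--             q4_clean = q4_clean[len(prefix):].strip(); break
--     return q4_clean[:50].rstrip('.,;')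
-- ===== SOURCE B (Python) =====
-- # B: the city table is derived (title-cased key + state, two specials) from compact
-- # per-state key strings, and the earliest match is found by a position-outer scan.
--
-- _STATE_KEYS = [
--     ("GA", "atlanta,jonesboro,lithonia,conyers,riverdale,decatur,marietta,"
--            "lawrenceville,college park,stone mountain,stonecrest,mcdonough,"
--            "covington,augusta,savannah,macon,powder springs,kennesaw,"
--            "douglasville,fayetteville,stockbridge,south fulton,forest park"),
--     ("UT", "provo,salt lake,orem,lehi,eagle mountain,draper,sandy,ogden,layton,"
--            "american fork,springville,herriman,saratoga springs"),
--     ("AZ", "phoenix,tucson,mesa,tempe,chandler,gilbert,scottsdale,glendale,"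
--            "peoria,surprise,avondale,goodyear,buckeye,queen creek"),
-- ]
-- _SPECIAL = {"mcdonough": "McDonough, GA", "salt lake": "Salt Lake City, UT"}
--
-- _CITIES = [(k, _SPECIAL.get(k, k.title() + ", " + st))
--            for st, keys in _STATE_KEYS for k in keys.split(",")]
--
-- _PREFIXES = ['I am currently located in ', 'I currently reside here in ',
--              'I live in the ', 'I live in ', "I'm in ", 'I am in ', 'I stay in ']
--
--
-- def extract_city(q4, market):
--     if not q4:
--         return market.title()
--     q4_lower = q4.lower()
--     # position-outer scan: the first position at which any known city starts is
--     # the earliest match; ties at a position resolved by table order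
--     for i in range(len(q4_lower)):
--         for city_key, city_display in _CITIES:
--             if q4_lower.startswith(city_key, i):
--                 return city_display
--     q4_clean = q4.strip()
--     hit = next((p for p in _PREFIXES if q4_clean.lower().startswith(p.lower())), None)
--     if hit is not None:
--         q4_clean = q4_clean[len(hit):].strip()
--     return q4_clean[:50].rstrip('.,;')
-- ===== Notes on version B (the rewrite author's own statement) =====
-- stated objective: alternative
-- what changed: B derives the city table from compact per-state key strings (title-cased key + state, two special displays) instead of a literal dict, and finds the earliest match by a position-outer startswith scan that returns immediately, replacing A's per-city .find minimisation loop; the prefix fallback becomes a single next()/find over the prefix list.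
import Mathlib
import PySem

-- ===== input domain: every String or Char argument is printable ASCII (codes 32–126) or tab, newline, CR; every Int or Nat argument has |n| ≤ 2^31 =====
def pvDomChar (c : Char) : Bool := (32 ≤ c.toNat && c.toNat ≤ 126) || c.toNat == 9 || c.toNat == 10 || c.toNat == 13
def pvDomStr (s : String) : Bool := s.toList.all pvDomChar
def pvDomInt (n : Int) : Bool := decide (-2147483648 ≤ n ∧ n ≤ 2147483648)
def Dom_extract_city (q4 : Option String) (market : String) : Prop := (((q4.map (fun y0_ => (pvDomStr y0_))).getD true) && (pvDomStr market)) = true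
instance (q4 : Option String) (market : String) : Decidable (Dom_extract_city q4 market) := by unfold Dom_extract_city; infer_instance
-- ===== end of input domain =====

-- B derives the city table from compact per-state key strings (title-cased key + state,
-- two special displays) and finds the earliest match by a position-outer scan that
-- returns on the first hit (alternative decomposition, same results).

-- ===== PORT A =====
-- A's module constant KNOWN_CITIES, verbatim
def pvCities : List (String × String) := [
  ("atlanta", "Atlanta, GA"), ("jonesboro", "Jonesboro, GA"), ("lithonia", "Lithonia, GA"),
  ("conyers", "Conyers, GA"), ("riverdale", "Riverdale, GA"), ("decatur", "Decatur, GA"),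
  ("marietta", "Marietta, GA"), ("lawrenceville", "Lawrenceville, GA"), ("college park", "College Park, GA"),
  ("stone mountain", "Stone Mountain, GA"), ("stonecrest", "Stonecrest, GA"),
  ("mcdonough", "McDonough, GA"), ("covington", "Covington, GA"), ("augusta", "Augusta, GA"),
  ("savannah", "Savannah, GA"), ("macon", "Macon, GA"), ("powder springs", "Powder Springs, GA"),
  ("kennesaw", "Kennesaw, GA"), ("douglasville", "Douglasville, GA"),
  ("fayetteville", "Fayetteville, GA"), ("stockbridge", "Stockbridge, GA"),
  ("south fulton", "South Fulton, GA"), ("forest park", "Forest Park, GA"),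
  ("provo", "Provo, UT"), ("salt lake", "Salt Lake City, UT"), ("orem", "Orem, UT"),
  ("lehi", "Lehi, UT"), ("eagle mountain", "Eagle Mountain, UT"), ("draper", "Draper, UT"),
  ("sandy", "Sandy, UT"), ("ogden", "Ogden, UT"), ("layton", "Layton, UT"),
  ("american fork", "American Fork, UT"), ("springville", "Springville, UT"),
  ("herriman", "Herriman, UT"), ("saratoga springs", "Saratoga Springs, UT"),
  ("phoenix", "Phoenix, AZ"), ("tucson", "Tucson, AZ"), ("mesa", "Mesa, AZ"),
  ("tempe", "Tempe, AZ"), ("chandler", "Chandler, AZ"), ("gilbert", "Gilbert, AZ"),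
  ("scottsdale", "Scottsdale, AZ"), ("glendale", "Glendale, AZ"), ("peoria", "Peoria, AZ"),
  ("surprise", "Surprise, AZ"), ("avondale", "Avondale, AZ"), ("goodyear", "Goodyear, AZ"),
  ("buckeye", "Buckeye, AZ"), ("queen creek", "Queen Creek, AZ")]

-- A's in-function prefix list (B's module constant is the same literal; shared here)
def pvPrefixes : List String := ["I am currently located in ", "I currently reside here in ",
  "I live in the ", "I live in ", "I'm in ", "I am in ", "I stay in "]

-- hand port of str.title() (PySem has no title); exact on the ASCII domain, where
-- Python's "cased" characters are exactly the letters
def pyTitleGo : Bool → List Char → List Char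
  | _, [] => []
  | prevAlpha, c :: cs =>
    if PySem.Chars.isalpha c then
      (if prevAlpha then PySem.Chars.lowerChar c else PySem.Chars.upperChar c) :: pyTitleGo true cs
    else c :: pyTitleGo false cs

def pyTitle (s : String) : String := String.mk (pyTitleGo false s.toList)

-- hand port of str.rstrip(".,;") (PySem's stripChars strips both sides): drop the
-- trailing run of '.', ',', ';'
def pyRstripPunct (s : String) : String :=
  String.mk ((s.toList.reverse.dropWhile (fun c => c == '.' || c == ',' || c == ';')).reverse)

-- A's prefix loop: first matching prefix is stripped, then break
def aPrefixLoop : List String → String → String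
  | [], q => q
  | p :: ps, q =>
    if PySem.Str.startswith (PySem.Str.lower q) (PySem.Str.lower p) then
      PySem.Str.strip (PySem.Str.slice q (some (PySem.Str.len p)) none)
    else aPrefixLoop ps q

def aFallback (s : String) : String :=
  let q4c := aPrefixLoop pvPrefixes (PySem.Str.strip s)
  pyRstripPunct (PySem.Str.slice q4c none (some 50))

def extract_city (q4 : Option String) (market : String) : String :=
  match q4 with
  | none => pyTitle market
  | some s =>
    if s = "" then pyTitle market
    else
      let q4l := PySem.Str.lower s
      let best := pvCities.foldl
        (fun st kv =>
          let pos := PySem.Str.find q4l kv.1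
          if 0 ≤ pos ∧ pos < st.2 then (some kv.2, pos) else st)
        ((none : Option String), PySem.Str.len q4l)
      match best.1 with
      | some c => c
      | none => aFallback s

-- ===== PORT B =====
-- B's compact table: comma-joined keys per state, display = title(key) ++ ", " ++ state
-- unless the key is in the special table (_STATE_KEYS / _SPECIAL / _CITIES in Source B)
def bStateKeys : List (String × String) := [
  ("GA", "atlanta,jonesboro,lithonia,conyers,riverdale,decatur,marietta,lawrenceville,college park,stone mountain,stonecrest,mcdonough,covington,augusta,savannah,macon,powder springs,kennesaw,douglasville,fayetteville,stockbridge,south fulton,forest park"),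
  ("UT", "provo,salt lake,orem,lehi,eagle mountain,draper,sandy,ogden,layton,american fork,springville,herriman,saratoga springs"),
  ("AZ", "phoenix,tucson,mesa,tempe,chandler,gilbert,scottsdale,glendale,peoria,surprise,avondale,goodyear,buckeye,queen creek")]

def bSpecial : List (String × String) :=
  [("mcdonough", "McDonough, GA"), ("salt lake", "Salt Lake City, UT")]

def bCities : List (String × String) :=
  bStateKeys.flatMap (fun p =>
    ((PySem.Str.split? p.2 ",").getD []).map (fun k =>
      (k, (PySem.Dict.get? (PySem.Dict.ofList bSpecial) k).getD (pyTitle k ++ ", " ++ p.1))))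

-- position-outer scan: at each position try the cities in table order, return on
-- the first hit (q4_lower.startswith(city_key, i))
def bScan (tbl : List (String × String)) : List Char → Option String
  | [] => none
  | c :: rest =>
    match tbl.find? (fun kv => PySem.Chars.startswith (c :: rest) kv.1.toList) with
    | some kv => some kv.2
    | none => bScan tbl rest

def bFallback (s : String) : String :=
  let q4c := PySem.Str.strip s
  let q4c2 :=
    match pvPrefixes.find? (fun p => PySem.Str.startswith (PySem.Str.lower q4c) (PySem.Str.lower p)) with
    | some p => PySem.Str.strip (PySem.Str.slice q4c (some (PySem.Str.len p)) none)
    | none => q4c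
  pyRstripPunct (PySem.Str.slice q4c2 none (some 50))

def extract_city_alt (q4 : Option String) (market : String) : String :=
  match q4 with
  | none => pyTitle market
  | some s =>
    if s = "" then pyTitle market
    else
      match bScan bCities (PySem.Str.lower s).toList with
      | some v => v
      | none => bFallback s

-- ===== PRECONDITION & SPEC =====
def Spec_extract_city (q4 : Option String) (market : String) (out : String) : Prop := out = extract_city_alt q4 market
instance (q4 : Option String) (market : String) (out : String) : Decidable (Spec_extract_city q4 market out) := by unfold Spec_extract_city; infer_instance

-- ===== CLAIM (what is proved, stated in full; the proofs are below) =====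
def Claim_equal_extract_city : Prop := ∀ (q4 : Option String) (market : String), Dom_extract_city q4 market → Spec_extract_city q4 market (extract_city q4 market)

-- ===== LEMMAS AND PROOFS =====

-- B's derived table is exactly A's literal dict
set_option maxRecDepth 400000 in
lemma bCities_eq : bCities = pvCities := by decide

-- A-side abbreviations for the proof
def Fc (cs : List Char) (kv : String × String) : Int := PySem.Chars.find cs kv.1.toList

def stepA (cs : List Char) (st : Option String × Int) (kv : String × String) : Option String × Int :=
  if 0 ≤ Fc cs kv ∧ Fc cs kv < st.2 then (some kv.2, Fc cs kv) else st

def minF (cs : List Char) (L : List (String × String)) (p0 : Int) : Int :=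
  L.foldl (fun p kv => if 0 ≤ Fc cs kv ∧ Fc cs kv < p then Fc cs kv else p) p0


lemma Fc_nonneg_iff (cs : List Char) (kv : String × String) :
    0 ≤ Fc cs kv ↔ kv.1.toList <:+: cs := PySem.Chars.find_nonneg_iff cs kv.1.toList

lemma Fc_spec (cs : List Char) (kv : String × String) (h : 0 ≤ Fc cs kv) :
    kv.1.toList <+: cs.drop (Fc cs kv).toNat ∧ ∀ i < (Fc cs kv).toNat, ¬ kv.1.toList <+: cs.drop i :=
  PySem.Chars.find_spec h

lemma minF_nil (cs : List Char) (p0 : Int) : minF cs [] p0 = p0 := rfl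

lemma minF_cons (cs : List Char) (kv : String × String) (L : List (String × String)) (p0 : Int) :
    minF cs (kv :: L) p0 = minF cs L (if 0 ≤ Fc cs kv ∧ Fc cs kv < p0 then Fc cs kv else p0) := rfl

lemma minF_le (cs : List Char) (L : List (String × String)) : ∀ p0 : Int, minF cs L p0 ≤ p0 := by
  induction L with
  | nil => intro p0; simp [minF_nil]
  | cons kv L ih =>
    intro p0
    rw [minF_cons]
    split_ifs with h
    · exact le_trans (ih _) (le_of_lt h.2)
    · exact ih p0

lemma minF_nonneg (cs : List Char) (L : List (String × String)) :
    ∀ p0 : Int, 0 ≤ p0 → 0 ≤ minF cs L p0 := by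
  induction L with
  | nil => intro p0 h; simpa [minF_nil] using h
  | cons kv L ih =>
    intro p0 h
    rw [minF_cons]
    split_ifs with hc
    · exact ih _ hc.1
    · exact ih _ h

lemma minF_le_of_mem (cs : List Char) (L : List (String × String)) (kv : String × String)
    (hmem : kv ∈ L) : ∀ p0 : Int, 0 ≤ Fc cs kv → minF cs L p0 ≤ Fc cs kv := by
  induction L with
  | nil => cases hmem
  | cons kv' L ih =>
    intro p0 hF
    rw [minF_cons]
    rcases List.mem_cons.mp hmem with heq | hmem'
    · subst heq
      split_ifs with hc
      · exact minF_le cs L _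
      · push_neg at hc
        exact le_trans (minF_le cs L _) (hc hF)
    · exact ih hmem' _ hF

lemma minF_eq_or_mem (cs : List Char) (L : List (String × String)) :
    ∀ p0 : Int, minF cs L p0 = p0 ∨ ∃ kv ∈ L, 0 ≤ Fc cs kv ∧ Fc cs kv = minF cs L p0 := by
  induction L with
  | nil => intro p0; exact Or.inl rfl
  | cons kv L ih =>
    intro p0
    rw [minF_cons]
    split_ifs with hc
    · rcases ih (Fc cs kv) with h | ⟨kv', hmem, hF, heq⟩
      · exact Or.inr ⟨kv, List.mem_cons_self, hc.1, h.symm ▸ h⟩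
      · exact Or.inr ⟨kv', List.mem_cons_of_mem _ hmem, hF, heq⟩
    · rcases ih p0 with h | ⟨kv', hmem, hF, heq⟩
      · exact Or.inl h
      · exact Or.inr ⟨kv', List.mem_cons_of_mem _ hmem, hF, heq⟩

lemma fold_fst (cs : List Char) (L : List (String × String)) :
    ∀ (b0 : Option String) (p0 : Int), 0 ≤ p0 →
    (L.foldl (stepA cs) (b0, p0)).1 =
      if minF cs L p0 = p0 then b0
      else (L.find? (fun kv => Fc cs kv == minF cs L p0)).elim b0 (fun kv => some kv.2) := by
  induction L with
  | nil => intro b0 p0 _; simp [minF_nil]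
  | cons kv L ih =>
    intro b0 p0 hp0
    rw [List.foldl_cons, minF_cons]
    by_cases hc : 0 ≤ Fc cs kv ∧ Fc cs kv < p0
    · rw [show stepA cs (b0, p0) kv = (some kv.2, Fc cs kv) from by simp [stepA, hc], if_pos hc]
      have hmle : minF cs L (Fc cs kv) ≤ Fc cs kv := minF_le cs L _
      have hmne : minF cs L (Fc cs kv) ≠ p0 := by omega
      rw [if_neg hmne, ih (some kv.2) (Fc cs kv) hc.1]
      by_cases hm : minF cs L (Fc cs kv) = Fc cs kv
      · rw [if_pos hm]
        rw [List.find?_cons_of_pos (by simp [hm])]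
        rfl
      · rw [if_neg hm]
        rw [List.find?_cons_of_neg (by simp; omega)]
        rcases (minF_eq_or_mem cs L (Fc cs kv)).resolve_left hm with ⟨kv', hmem, hF, heq⟩
        have : (L.find? (fun kv0 => Fc cs kv0 == minF cs L (Fc cs kv))).isSome := by
          rw [List.find?_isSome]
          exact ⟨kv', hmem, by simp [heq]⟩
        rcases Option.isSome_iff_exists.mp this with ⟨kvw, hw⟩
        rw [hw]
        rfl
    · rw [show stepA cs (b0, p0) kv = (b0, p0) from by simp [stepA, hc], if_neg hc]
      rw [ih b0 p0 hp0]
      by_cases hm : minF cs L p0 = p0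
      · rw [if_pos hm, if_pos hm]
      · rw [if_neg hm, if_neg hm]
        have hmle := minF_le cs L p0
        have hm0 : 0 ≤ minF cs L p0 := minF_nonneg cs L p0 hp0
        rw [List.find?_cons_of_neg (by simp; intro h; exfalso; apply hc; constructor <;> omega)]

-- A's inline fold is the stepA fold
lemma port_fold_eq (q4l : String) :
    (pvCities.foldl
      (fun st kv =>
        let pos := PySem.Str.find q4l kv.1
        if 0 ≤ pos ∧ pos < st.2 then (some kv.2, pos) else st)
      ((none : Option String), PySem.Str.len q4l))
    = pvCities.foldl (stepA q4l.toList) ((none : Option String), (q4l.toList.length : Int)) := by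
  simp only [PySem.Str.find_eq, PySem.Str.len_eq]
  rfl

set_option maxRecDepth 400000 in
lemma keys_ne_nil : ∀ kv ∈ pvCities, kv.1.toList ≠ [] := by decide

lemma find?_congr_mem {α : Type} (p q : α → Bool) (L : List α)
    (h : ∀ x ∈ L, p x = q x) : L.find? p = L.find? q := by
  induction L with
  | nil => rfl
  | cons a t ih =>
    simp only [List.find?]
    rw [h a List.mem_cons_self]
    cases q a
    · exact ih (fun x hx => h x (List.mem_cons_of_mem _ hx))
    · rfl

set_option maxRecDepth 400000 in
lemma firstAt_nil : pvCities.find? (fun kv => PySem.Chars.startswith ([] : List Char) kv.1.toList) = none := by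
  decide



lemma bScan_none (cs : List Char) (h : ∀ kv ∈ pvCities, ¬ kv.1.toList <:+: cs) : bScan pvCities cs = none := by
  induction cs with
  | nil => rfl
  | cons c t ih =>
    rw [bScan]
    rw [List.find?_eq_none.mpr (fun kv hkv => by
      simp only [PySem.Chars.startswith_iff]
      exact fun hp => h kv hkv hp.isInfix)]
    exact ih (fun kv hkv hinf => h kv hkv (hinf.trans (List.suffix_cons c t).isInfix))

lemma bScan_at : ∀ (m : Nat) (cs : List Char) (kv₀ : String × String),
    (∀ j < m, pvCities.find? (fun kv => PySem.Chars.startswith (cs.drop j) kv.1.toList) = none) →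
    pvCities.find? (fun kv => PySem.Chars.startswith (cs.drop m) kv.1.toList) = some kv₀ →
    bScan pvCities cs = some kv₀.2 := by
  intro m
  induction m with
  | zero =>
    intro cs kv₀ _ hfind
    cases cs with
    | nil => rw [List.drop_zero] at hfind; rw [firstAt_nil] at hfind; cases hfind
    | cons c t =>
      rw [List.drop_zero] at hfind
      rw [bScan, hfind]
  | succ m ih =>
    intro cs kv₀ hnone hfind
    cases cs with
    | nil =>
      rw [List.drop_nil] at hfind; rw [firstAt_nil] at hfind; cases hfind
    | cons c t =>
      have h0 := hnone 0 (Nat.succ_pos m)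
      rw [List.drop_zero] at h0
      rw [bScan, h0]
      exact ih t kv₀ (fun j hj => hnone (j + 1) (by omega)) hfind

-- the central lemma: A's best-match fold returns exactly B's position scan
lemma search_eq (cs : List Char) :
    (pvCities.foldl (stepA cs) ((none : Option String), (cs.length : Int))).1 = bScan pvCities cs := by
  have hp0 : (0 : Int) ≤ (cs.length : Int) := by positivity
  rw [fold_fst cs pvCities none (cs.length : Int) hp0]
  by_cases hm : minF cs pvCities (cs.length : Int) = (cs.length : Int)
  · rw [if_pos hm]
    symm
    apply bScan_none
    intro kv hkv hinf
    have h0 : 0 ≤ Fc cs kv := (Fc_nonneg_iff cs kv).mpr hinf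
    have hspec := Fc_spec cs kv h0
    have hne : cs.drop (Fc cs kv).toNat ≠ [] := by
      intro hnil
      rcases hspec.1 with ⟨r, hr⟩
      rw [hnil] at hr
      exact keys_ne_nil kv hkv (List.append_eq_nil_iff.mp hr).1
    have hlt : (Fc cs kv).toNat < cs.length := by
      by_contra hge
      exact hne (List.drop_eq_nil_of_le (by omega))
    have hle := minF_le_of_mem cs pvCities kv hkv (cs.length : Int) h0
    omega
  · rw [if_neg hm]
    set m := minF cs pvCities (cs.length : Int) with hmdef
    have hmle : m ≤ (cs.length : Int) := minF_le cs pvCities _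
    have hm0 : 0 ≤ m := minF_nonneg cs pvCities _ hp0
    have hmlt : m < (cs.length : Int) := lt_of_le_of_ne hmle hm
    have hmnat : m = ((m.toNat : Nat) : Int) := by omega
    -- key fact: matching at position m.toNat ↔ find position = m
    have hpred : ∀ kv ∈ pvCities,
        (PySem.Chars.startswith (cs.drop m.toNat) kv.1.toList) = (Fc cs kv == m) := by
      intro kv hkv
      by_cases hp : kv.1.toList <+: cs.drop m.toNat
      · have hsw : PySem.Chars.startswith (cs.drop m.toNat) kv.1.toList = true :=
          (PySem.Chars.startswith_iff _ _).mpr hp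
        have hinf : kv.1.toList <:+: cs := hp.isInfix.trans (List.drop_suffix m.toNat cs).isInfix
        have h0 : 0 ≤ Fc cs kv := (Fc_nonneg_iff cs kv).mpr hinf
        have hspec := Fc_spec cs kv h0
        have hFle : Fc cs kv ≤ m := by
          by_contra hgt
          exact hspec.2 m.toNat (by omega) hp
        have hFge := minF_le_of_mem cs pvCities kv hkv (cs.length : Int) h0
        have hEq : Fc cs kv = m := by omega
        simp [hsw, hEq]
      · have hsw : PySem.Chars.startswith (cs.drop m.toNat) kv.1.toList = false := by
          rw [← Bool.not_eq_true, PySem.Chars.startswith_iff]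
          exact hp
        rw [hsw]
        symm
        simp only [beq_eq_false_iff_ne, ne_eq]
        intro hFeq
        have h0 : 0 ≤ Fc cs kv := by omega
        have hspec := Fc_spec cs kv h0
        apply hp
        have : (Fc cs kv).toNat = m.toNat := by omega
        rw [← this]
        exact hspec.1
    have hfind_eq :
        pvCities.find? (fun kv => PySem.Chars.startswith (cs.drop m.toNat) kv.1.toList)
          = pvCities.find? (fun kv => Fc cs kv == m) :=
      find?_congr_mem _ _ _ hpred
    rcases (minF_eq_or_mem cs pvCities (cs.length : Int)).resolve_left hm with ⟨kv', hmem, hF, heq⟩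
    have hsome : (pvCities.find? (fun kv => Fc cs kv == m)).isSome := by
      rw [List.find?_isSome]
      exact ⟨kv', hmem, by simp [heq, hmdef]⟩
    rcases Option.isSome_iff_exists.mp hsome with ⟨kvw, hw⟩
    rw [hw]
    have hbefore : ∀ j < m.toNat,
        pvCities.find? (fun kv => PySem.Chars.startswith (cs.drop j) kv.1.toList) = none := by
      intro j hj
      rw [List.find?_eq_none]
      intro kv hkv
      simp only [PySem.Chars.startswith_iff]
      intro hp
      have hinf : kv.1.toList <:+: cs := hp.isInfix.trans (List.drop_suffix j cs).isInfix
      have h0 : 0 ≤ Fc cs kv := (Fc_nonneg_iff cs kv).mpr hinf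
      have hspec := Fc_spec cs kv h0
      have hFle : Fc cs kv ≤ (j : Int) := by
        by_contra hgt
        exact hspec.2 j (by omega) hp
      have hFge := minF_le_of_mem cs pvCities kv hkv (cs.length : Int) h0
      omega
    rw [bScan_at m.toNat cs kvw hbefore (by rw [hfind_eq, hw])]
    rfl

-- the two fallback blocks agree: A's break-loop is B's find?-then-strip
lemma prefixLoop_eq : ∀ (P : List String) (q : String),
    aPrefixLoop P q =
      match P.find? (fun p => PySem.Str.startswith (PySem.Str.lower q) (PySem.Str.lower p)) with
      | some p => PySem.Str.strip (PySem.Str.slice q (some (PySem.Str.len p)) none)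
      | none => q := by
  intro P
  induction P with
  | nil => intro q; rfl
  | cons p ps ih =>
    intro q
    rw [aPrefixLoop]
    by_cases hc : PySem.Str.startswith (PySem.Str.lower q) (PySem.Str.lower p) = true
    · rw [if_pos hc]
      simp only [List.find?_cons, hc]
    · have hc' : PySem.Str.startswith (PySem.Str.lower q) (PySem.Str.lower p) = false := by
        simpa using hc
      rw [if_neg hc]
      simp only [List.find?_cons, hc']
      exact ih q

lemma fallback_eq (s : String) : aFallback s = bFallback s := by
  unfold aFallback bFallback
  rw [prefixLoop_eq]

-- ===== VERDICT (by name: the statement is the Claim_ definition above) =====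
theorem extract_city_spec : Claim_equal_extract_city := by
  intro q4 market _dom
  unfold Spec_extract_city
  cases q4 with
  | none => rfl
  | some s =>
    by_cases hs : s = ""
    · simp [extract_city, extract_city_alt, hs]
    · simp only [extract_city, extract_city_alt, if_neg hs]
      rw [port_fold_eq, search_eq]
      rw [bCities_eq]
      cases bScan pvCities (PySem.Str.lower s).toList with
      | none => exact fallback_eq s
      | some v => rfl
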